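-- pv_equiv track=rewrite | github.com/GuudMan/Algorithm | 题目/移动字符串位置.py | move_char1
-- ===== SOURCE A (Python) =====
-- def move_char1(str_list):
--     j = len(str_list) - 1
--     for i in range(len(str_list)-1, -1, -1):
--         if str_list[i] != '*':
--             str_list[j] = str_list[i]
--             j -= 1
--
--     for k in range(j + 1):
--         str_list[k] = '*'
--     return str_list
-- ===== SOURCE B (Python) =====
-- def move_char1(str_list):
--     n = str_list.count('*')
--     rest = [c for c in str_list if c != '*']
--     str_list[:] = ['*'] * n + rest
--     return str_list
-- ===== Notes on version B (the rewrite author's own statement) =====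
-- stated objective: simpler
-- what changed: Replaces A's backward two-pointer in-place rearrangement (copy non-'*' elements to a moving write index, then fill the front) with a count-then-filter-then-concatenate rebuild assigned back via slice assignment.
import Mathlib
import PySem

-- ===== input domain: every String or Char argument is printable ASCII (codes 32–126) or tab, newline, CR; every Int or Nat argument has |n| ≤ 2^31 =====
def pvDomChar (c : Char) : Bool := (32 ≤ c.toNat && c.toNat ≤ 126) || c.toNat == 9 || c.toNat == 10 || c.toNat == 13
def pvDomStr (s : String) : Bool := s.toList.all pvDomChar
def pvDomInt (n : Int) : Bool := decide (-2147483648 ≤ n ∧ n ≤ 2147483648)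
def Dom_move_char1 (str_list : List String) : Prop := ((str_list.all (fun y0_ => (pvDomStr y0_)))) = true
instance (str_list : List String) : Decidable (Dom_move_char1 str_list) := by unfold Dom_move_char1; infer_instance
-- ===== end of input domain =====

-- B replaces A's backward two-pointer in-place rearrangement with a count–filter–concatenate rebuild (simpler).
-- Python A and B both mutate the argument list in place; the equivalence proved here is about the RETURN value.

-- ===== PORT A =====
-- backward scan: copy each non-'*' element to the write index j (from the right), then fill str_list[0..j] with '*'
def move_char1 (str_list : List String) : List String :=
  let s := (PySem.List.pyRange ((str_list.length : Int) - 1) (-1) (-1)).foldl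
    (fun (st : List String × Int) i =>
      if PySem.List.pyGetD st.1 i "" ≠ "*" then
        (PySem.List.pySetD st.1 st.2 (PySem.List.pyGetD st.1 i ""), st.2 - 1)
      else st)
    (str_list, (str_list.length : Int) - 1)
  (PySem.List.pyRange 0 (s.2 + 1) 1).foldl
    (fun lst k => PySem.List.pySetD lst k "*") s.1

-- ===== PORT B =====
-- n = str_list.count('*'); rest = [c for c in str_list if c != '*']; str_list[:] = ['*'] * n + rest
def move_char1_alt (str_list : List String) : List String :=
  List.replicate (PySem.List.count str_list "*") "*"
    ++ str_list.filter (fun c => c ≠ "*")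

-- ===== PRECONDITION & SPEC =====
def Spec_move_char1 (str_list : List String) (out : List String) : Prop := out = move_char1_alt str_list
instance (str_list : List String) (out : List String) : Decidable (Spec_move_char1 str_list out) := by unfold Spec_move_char1; infer_instance

-- ===== CLAIM (what is proved, stated in full; the proofs are below) =====
def Claim_equal_move_char1 : Prop := ∀ (str_list : List String), Dom_move_char1 str_list → Spec_move_char1 str_list (move_char1 str_list)

-- ===== LEMMAS AND PROOFS =====

def pvStep (st : List String × Int) (i : Int) : List String × Int :=
  if PySem.List.pyGetD st.1 i "" ≠ "*" then
    (PySem.List.pySetD st.1 st.2 (PySem.List.pyGetD st.1 i ""), st.2 - 1)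
  else st

theorem pvSetAt (xs zs : List String) (x v : String) (i : Nat) (h : xs.length = i) :
    (xs ++ x :: zs).set i v = xs ++ v :: zs := by
  subst h; simp

theorem pvLoop1_inv (L : List String) (i : Nat) (hi : i ≤ L.length) (M : List String)
    (hlen : i + M.length + ((L.drop i).filter (fun c => c ≠ "*")).length = L.length) :
    ∃ M' : List String,
      M'.length = L.length - (L.filter (fun c => c ≠ "*")).length ∧
      (PySem.List.pyRange ((i : Int) - 1) (-1) (-1)).foldl pvStep
          (L.take i ++ M ++ (L.drop i).filter (fun c => c ≠ "*"), (i : Int) + M.length - 1)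
        = (M' ++ L.filter (fun c => c ≠ "*"),
           ((L.length : Int) - ((L.filter (fun c => c ≠ "*")).length : Int)) - 1) := by
  induction i generalizing M with
  | zero =>
      simp only [List.drop_zero] at hlen
      refine ⟨M, ?_, ?_⟩
      · omega
      · rw [PySem.List.pyRange_neg_one_eq_nil (by omega)]
        simp only [List.foldl_nil, List.drop_zero, List.take_zero, List.nil_append]
        have h1 : (L.filter (fun c => c ≠ "*")).length ≤ L.length := List.length_filter_le _ _
        have : (M.length : Int) = (L.length : Int) - ((L.filter (fun c => c ≠ "*")).length : Int) := by
          omega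
        rw [this]; norm_num
  | succ i ih =>
      have hiL : i < L.length := by omega
      have htake : L.take (i + 1) = L.take i ++ [L[i]] := List.take_succ_eq_append_getElem hiL
      have hdrop : L.drop i = L[i] :: L.drop (i + 1) := List.drop_eq_getElem_cons hiL
      have hcons : PySem.List.pyRange (((i + 1 : Nat) : Int) - 1) (-1) (-1)
          = ((i : Nat) : Int) :: PySem.List.pyRange (((i : Nat) : Int) - 1) (-1) (-1) := by
        have h1 : ((i + 1 : Nat) : Int) - 1 = ((i : Nat) : Int) := by push_cast; ring
        rw [h1, PySem.List.pyRange_neg_one_cons (by omega)]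
      have hread : PySem.List.pyGetD
          (L.take (i + 1) ++ M ++ (L.drop (i + 1)).filter (fun c => c ≠ "*")) ((i : Nat) : Int) "" = L[i] := by
        have hlt : i < (L.take (i+1)).length := by simp [List.length_take]; omega
        rw [PySem.List.pyGetD_natCast, List.getD_eq_getElem?_getD, List.append_assoc,
          List.getElem?_append_left hlt]
        simp [hiL]
      rw [hcons, List.foldl_cons]
      by_cases hstar : L[i] = "*"
      · -- element is '*': state unchanged; absorb it into the junk middle
        have hbody : pvStep (L.take (i+1) ++ M ++ (L.drop (i+1)).filter (fun c => c ≠ "*"),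
            ((i + 1 : Nat) : Int) + (M.length : Int) - 1) ((i : Nat) : Int)
            = (L.take (i+1) ++ M ++ (L.drop (i+1)).filter (fun c => c ≠ "*"),
               ((i + 1 : Nat) : Int) + (M.length : Int) - 1) := by
          unfold pvStep
          dsimp only
          rw [if_neg (by rw [hread, hstar]; simp)]
        have hfiltdrop : (L.drop i).filter (fun c => c ≠ "*") = (L.drop (i+1)).filter (fun c => c ≠ "*") := by
          rw [hdrop, List.filter_cons_of_neg (by simp [hstar])]
        have hre : L.take (i+1) ++ M ++ (L.drop (i+1)).filter (fun c => c ≠ "*")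
            = L.take i ++ (L[i] :: M) ++ (L.drop i).filter (fun c => c ≠ "*") := by
          rw [hfiltdrop, htake]
          simp only [List.append_assoc, List.cons_append, List.nil_append]
        have hj : ((i + 1 : Nat) : Int) + (M.length : Int) - 1
            = ((i : Nat) : Int) + ((L[i] :: M).length : Int) - 1 := by
          simp only [List.length_cons]; push_cast; ring
        obtain ⟨M', hM', hfold⟩ := ih (by omega) (L[i] :: M)
          (by simp only [List.length_cons, hfiltdrop]; omega)
        refine ⟨M', hM', ?_⟩
        rw [hbody, hre, hj]
        exact hfold
      · -- element moved to index j = i + M.length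
        have hfiltdrop : (L.drop i).filter (fun c => c ≠ "*")
            = L[i] :: (L.drop (i+1)).filter (fun c => c ≠ "*") := by
          rw [hdrop, List.filter_cons_of_pos (by simp [hstar])]
        have hjcast : ((i + 1 : Nat) : Int) + (M.length : Int) - 1 = ((i + M.length : Nat) : Int) := by
          push_cast; ring
        rcases M.eq_nil_or_concat with hM | ⟨M₀, m, hM⟩
        · subst hM
          have hbody : pvStep (L.take (i+1) ++ [] ++ (L.drop (i+1)).filter (fun c => c ≠ "*"),
              ((i + 1 : Nat) : Int) + (([] : List String).length : Int) - 1) ((i : Nat) : Int)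
              = (L.take i ++ [] ++ (L.drop i).filter (fun c => c ≠ "*"),
                 ((i : Nat) : Int) + (([] : List String).length : Int) - 1) := by
            unfold pvStep
            dsimp only
            rw [if_pos (by rw [hread]; simp [hstar])]
            refine Prod.ext ?_ (by dsimp only; simp only [List.length_nil]; push_cast; ring)
            dsimp only
            rw [hread, hjcast, PySem.List.pySetD_natCast]
            rw [List.append_nil, List.append_nil, htake, hfiltdrop, List.append_assoc,
              List.singleton_append]
            exact pvSetAt (L.take i) _ _ _ _ (by simp [List.length_take]; omega)
          rw [hbody]
          exact ih (by omega) [] (by simp only [List.length_nil, hfiltdrop, List.length_cons] at hlen ⊢; omega)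
        · rw [List.concat_eq_append] at hM
          subst hM
          have hbody : pvStep (L.take (i+1) ++ (M₀ ++ [m]) ++ (L.drop (i+1)).filter (fun c => c ≠ "*"),
              ((i + 1 : Nat) : Int) + ((M₀ ++ [m]).length : Int) - 1) ((i : Nat) : Int)
              = (L.take i ++ (L[i] :: M₀) ++ (L.drop i).filter (fun c => c ≠ "*"),
                 ((i : Nat) : Int) + ((L[i] :: M₀).length : Int) - 1) := by
            unfold pvStep
            dsimp only
            rw [if_pos (by rw [hread]; simp [hstar])]
            refine Prod.ext ?_ (by dsimp only; push_cast [List.length_append, List.length_cons, List.length_nil]; ring)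
            dsimp only
            rw [hread, hjcast, PySem.List.pySetD_natCast]
            have h1 : L.take (i+1) ++ (M₀ ++ [m]) ++ (L.drop (i+1)).filter (fun c => c ≠ "*")
                = (L.take (i+1) ++ M₀) ++ m :: (L.drop (i+1)).filter (fun c => c ≠ "*") := by
              simp only [List.append_assoc, List.cons_append, List.nil_append]
            rw [h1, pvSetAt (L.take (i+1) ++ M₀) _ _ _ _
              (by simp [List.length_take]; omega)]
            rw [htake, hfiltdrop]
            simp only [List.append_assoc, List.cons_append, List.nil_append]
          rw [hbody]
          exact ih (by omega) (L[i] :: M₀)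
            (by rw [hfiltdrop]; simp at hlen ⊢; omega)

theorem pvLoop2 (j : Nat) (M rest : List String) (hM : M.length = j) :
    (PySem.List.pyRange 0 (j : Int) 1).foldl (fun lst k => PySem.List.pySetD lst k "*") (M ++ rest)
      = List.replicate j "*" ++ rest := by
  induction j generalizing M rest with
  | zero =>
      rw [PySem.List.pyRange_one_eq_nil (by omega)]
      simp at hM
      simp [hM]
  | succ j ih =>
      rcases M.eq_nil_or_concat with hMn | ⟨M₀, m, hMc⟩
      · subst hMn; simp at hM
      · rw [List.concat_eq_append] at hMc
        subst hMc
        have hj : ((j + 1 : Nat) : Int) = (j : Nat) + 1 := by push_cast; ring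
        rw [hj, PySem.List.pyRange_one_succ_right (by omega), List.foldl_append]
        have hM0 : M₀.length = j := by simp at hM; omega
        rw [List.append_assoc, List.singleton_append, ih M₀ (m :: rest) hM0, List.foldl_cons, List.foldl_nil,
          PySem.List.pySetD_natCast]
        rw [pvSetAt _ _ _ _ _ (by simp : (List.replicate j "*").length = j)]
        rw [List.replicate_succ', List.append_assoc, List.singleton_append]

theorem pvCount (L : List String) :
    PySem.List.count L "*" = L.length - (L.filter (fun c => c ≠ "*")).length := by
  rw [PySem.List.count_eq]
  have h1 : (L.filter (fun c => c ≠ "*")).length = L.countP (fun c => decide (c ≠ "*")) :=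
    List.countP_eq_length_filter.symm
  have h2 : L.length = L.countP (fun c => decide (c ≠ "*")) + L.countP (fun c => !decide (c ≠ "*")) := by
    have := List.length_eq_countP_add_countP (p := fun c => decide (c ≠ "*")) (l := L)
    simpa using this
  have h3 : L.count "*" = L.countP (fun c => !decide (c ≠ "*")) := by
    simp only [List.count_eq_countP']
    apply List.countP_congr
    intro a _
    simp
  omega

-- ===== VERDICT (by name: the statement is the Claim_ definition above) =====
theorem move_char1_spec : Claim_equal_move_char1 := by
  intro L _
  unfold Spec_move_char1 move_char1_alt
  obtain ⟨M', hM', hfold⟩ := pvLoop1_inv L L.length (le_refl _) [] (by simp)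
  have hinit : L.take L.length ++ [] ++ (L.drop L.length).filter (fun c => c ≠ "*") = L := by simp
  have hj0 : ((L.length : Nat) : Int) + (([] : List String).length : Int) - 1 = (L.length : Int) - 1 := by
    simp
  rw [hinit, hj0] at hfold
  have hfold' : List.foldl
      (fun (st : List String × Int) i =>
        if PySem.List.pyGetD st.1 i "" ≠ "*" then
          (PySem.List.pySetD st.1 st.2 (PySem.List.pyGetD st.1 i ""), st.2 - 1)
        else st)
      (L, (L.length : Int) - 1)
      (PySem.List.pyRange ((L.length : Int) - 1) (-1) (-1))
      = (M' ++ L.filter (fun c => c ≠ "*"),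
         ((L.length : Int) - ((L.filter (fun c => c ≠ "*")).length : Int)) - 1) := hfold
  simp only [move_char1]
  rw [hfold']
  dsimp only
  have hle : (L.filter (fun c => c ≠ "*")).length ≤ L.length := List.length_filter_le _ _
  have hcast : ((L.length : Nat) : Int) - (((L.filter (fun c => c ≠ "*")).length : Nat) : Int) - 1 + 1
      = ((L.length - (L.filter (fun c => c ≠ "*")).length : Nat) : Int) := by
    omega
  rw [hcast, pvLoop2 _ M' _ hM', pvCount]
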